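-- pv_equiv track=rewrite | github.com/alfonsoguerrero2/search-tool | search_tool.py | has_exact_phrase_match
-- ===== SOURCE A (Python) =====
-- def has_exact_phrase_match(word_positions):
--     # Start with positions of the first word
--     for start_pos in word_positions[0]:
--         match = True
--         current_pos = start_pos
--         for i in range(1, len(word_positions)):
--             next_pos = current_pos + 1
--             if next_pos not in word_positions[i]:
--                 match = False
--                 break
--             current_pos = next_pos
--         if match:
--             return True  # Found exact phrase match
--     return False  # No match found
-- ===== SOURCE B (Python) =====
-- def has_exact_phrase_match(word_positions):
--     # Candidate phrase-start positions: intersect the i-th word's positions shifted left by i.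
--     candidates = set(word_positions[0])
--     for i, positions in enumerate(word_positions[1:], 1):
--         candidates &= {p - i for p in positions}
--     return bool(candidates)
-- ===== Notes on version B (the rewrite author's own statement) =====
-- stated objective: alternative
-- what changed: Replaces the forward-scanning nested loop with early break by a set-intersection pass: candidate start positions begin as set of the first word's positions and are intersected with each later word's positions shifted left by its offset; the answer is whether any candidate survives.
-- outside the precondition, e.g. on has_exact_phrase_match([]): A raises IndexError, B raises IndexError
import Mathlib
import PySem

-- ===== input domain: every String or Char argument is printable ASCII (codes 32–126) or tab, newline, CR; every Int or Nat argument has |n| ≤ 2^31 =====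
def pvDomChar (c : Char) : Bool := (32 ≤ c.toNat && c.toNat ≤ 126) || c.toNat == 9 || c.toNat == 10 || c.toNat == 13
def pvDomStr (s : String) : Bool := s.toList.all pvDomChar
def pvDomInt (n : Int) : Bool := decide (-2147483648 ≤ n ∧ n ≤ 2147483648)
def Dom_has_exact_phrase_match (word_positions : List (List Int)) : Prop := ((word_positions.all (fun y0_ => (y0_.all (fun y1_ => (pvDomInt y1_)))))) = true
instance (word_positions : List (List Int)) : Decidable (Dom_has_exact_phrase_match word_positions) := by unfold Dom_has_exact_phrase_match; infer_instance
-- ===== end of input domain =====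

-- B replaces A's nested forward scan (with early break) by intersecting shifted candidate-start
-- sets; equivalence proved on nonempty input (Python raises IndexError on [] in both programs).

-- ===== PORT A =====
-- inner loop: for i in range(1, len(word_positions)) with break, state (current_pos)
def pvA_inner (wp : List (List Int)) : List Int → Int → Bool
  | [], _ => true
  | i :: rest, current_pos =>
    let next_pos := current_pos + 1
    if (PySem.List.pyGetD wp i []).contains next_pos then
      pvA_inner wp rest next_pos
    else
      false

-- outer loop: for start_pos in word_positions[0] with early return True
def pvA_outer (wp : List (List Int)) : List Int → Bool
  | [] => false
  | start_pos :: rest =>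
    if pvA_inner wp (PySem.List.pyRange 1 (wp.length : Int) 1) start_pos then true
    else pvA_outer wp rest

def has_exact_phrase_match (word_positions : List (List Int)) : Bool :=
  match PySem.List.pyGet? word_positions 0 with
  | none => false   -- IndexError in Python; excluded by Pre_
  | some first => pvA_outer word_positions first

-- ===== PORT B =====
def has_exact_phrase_match_alt (word_positions : List (List Int)) : Bool :=
  match word_positions with
  | [] => false     -- IndexError in Python; excluded by Pre_
  | first :: rest =>
    let candidates : PySem.Set Int := PySem.Set.ofList first
    let c := (PySem.List.enumerate rest 1).foldl
      (fun c p => PySem.Set.inter c (PySem.Set.ofList (p.2.map (fun q => q - p.1)))) candidates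
    !c.isEmpty

-- ===== PRECONDITION & SPEC =====
-- Pre_ excludes only the empty list, on which the Python A (and B) raises IndexError.
def Pre_has_exact_phrase_match (word_positions : List (List Int)) : Prop := word_positions ≠ []
instance (word_positions : List (List Int)) : Decidable (Pre_has_exact_phrase_match word_positions) := by unfold Pre_has_exact_phrase_match; infer_instance
def pvWitness_has_exact_phrase_match : List (List Int) := [[0, 2], [1]]

def Spec_has_exact_phrase_match (word_positions : List (List Int)) (out : Bool) : Prop := out = has_exact_phrase_match_alt word_positions
instance (word_positions : List (List Int)) (out : Bool) : Decidable (Spec_has_exact_phrase_match word_positions out) := by unfold Spec_has_exact_phrase_match; infer_instance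

-- ===== CLAIM (what is proved, stated in full; the proofs are below) =====
def Claim_equal_has_exact_phrase_match : Prop := ∀ (word_positions : List (List Int)), Dom_has_exact_phrase_match word_positions → Pre_has_exact_phrase_match word_positions → Spec_has_exact_phrase_match word_positions (has_exact_phrase_match word_positions)

-- ===== LEMMAS AND PROOFS =====

-- direct recursion matching A's inner loop on the tail of the list
def pvConsec : List (List Int) → Int → Bool
  | [], _ => true
  | l :: rest, c => l.contains (c + 1) && pvConsec rest (c + 1)

theorem pvA_inner_eq_pvConsec (wp : List (List Int)) :
    ∀ (t : List (List Int)) (k : Nat) (c : Int), wp.drop k = t → k ≤ wp.length →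
      pvA_inner wp (PySem.List.pyRange (k : Int) (wp.length : Int) 1) c = pvConsec t c := by
  intro t
  induction t with
  | nil =>
    intro k c hdrop hk
    have hk' : k = wp.length := by
      have := congrArg List.length hdrop
      simp [List.length_drop] at this
      omega
    rw [PySem.List.pyRange_one_eq_nil (by exact_mod_cast le_of_eq hk'.symm)]
    rfl
  | cons l rest ih =>
    intro k c hdrop hk
    have hlt : k < wp.length := by
      have := congrArg List.length hdrop
      simp [List.length_drop] at this
      omega
    rw [PySem.List.pyRange_one_cons (by exact_mod_cast hlt)]
    have hget : PySem.List.pyGetD wp (k : Int) [] = l := by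
      rw [PySem.List.pyGetD_natCast]
      have : wp.getD k [] = (wp.drop k).getD 0 [] := by
        simp [List.getD_eq_getElem?_getD, List.getElem?_drop]
      rw [this, hdrop]; rfl
    have hdrop' : wp.drop (k + 1) = rest := by
      have : wp.drop (k + 1) = (wp.drop k).drop 1 := by
        rw [← List.drop_drop]
      rw [this, hdrop]; rfl
    show (if (PySem.List.pyGetD wp (k : Int) []).contains (c + 1) then
        pvA_inner wp (PySem.List.pyRange ((k : Int) + 1) (wp.length : Int) 1) (c + 1)
      else false) = pvConsec (l :: rest) c
    rw [hget]
    by_cases hc : l.contains (c + 1)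
    · have hcast : ((k : Int) + 1) = ((k + 1 : Nat) : Int) := by push_cast; ring
      rw [if_pos hc, hcast, ih (k + 1) (c + 1) hdrop' (by omega)]
      show pvConsec rest (c + 1) = pvConsec (l :: rest) c
      unfold pvConsec
      rw [hc, Bool.true_and]
      cases rest <;> rfl
    · rw [if_neg hc]
      have hcf : l.contains (c + 1) = false := by simpa using hc
      show false = pvConsec (l :: rest) c
      unfold pvConsec
      rw [hcf, Bool.false_and]

theorem pvConsec_iff (t : List (List Int)) :
    ∀ c : Int, pvConsec t c = true ↔ ∀ (j : Nat) (h : j < t.length), (c + (j : Int) + 1) ∈ t[j] := by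
  induction t with
  | nil => intro c; simp [pvConsec]
  | cons l rest ih =>
    intro c
    simp only [pvConsec, Bool.and_eq_true, ih]
    constructor
    · rintro ⟨h0, hr⟩ j hj
      cases j with
      | zero => simpa using h0
      | succ j =>
        have hj' : j < rest.length := by simpa using hj
        have he : c + ((j + 1 : Nat) : Int) + 1 = c + 1 + (j : Int) + 1 := by push_cast; ring
        simp only [List.getElem_cons_succ]
        rw [he]
        exact hr j hj'
    · intro h
      refine ⟨by simpa using h 0 (by simp), ?_⟩
      intro j hj
      have := h (j + 1) (by simp; omega)
      simp only [List.getElem_cons_succ] at this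
      have he : c + ((j + 1 : Nat) : Int) + 1 = c + 1 + (j : Int) + 1 := by push_cast; ring
      rw [he] at this
      exact this

theorem pvA_outer_iff (wp : List (List Int)) (h : List Int) :
    pvA_outer wp h = true ↔ ∃ s ∈ h, pvA_inner wp (PySem.List.pyRange 1 (wp.length : Int) 1) s = true := by
  induction h with
  | nil => simp [pvA_outer]
  | cons s rest ih =>
    by_cases hs : pvA_inner wp (PySem.List.pyRange 1 (wp.length : Int) 1) s = true
    · simp [pvA_outer, hs]
    · simp [pvA_outer, hs, ih]

theorem pvB_fold_mem (ps : List (Int × List Int)) :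
    ∀ (c : PySem.Set Int) (s : Int),
      s ∈ ps.foldl (fun c p => PySem.Set.inter c (PySem.Set.ofList (p.2.map (fun q => q - p.1)))) c ↔
        s ∈ c ∧ ∀ p ∈ ps, (s + p.1) ∈ p.2 := by
  induction ps with
  | nil => intro c s; simp
  | cons p rest ih =>
    intro c s
    rw [List.foldl_cons, ih]
    rw [PySem.Set.mem_inter, PySem.Set.mem_ofList]
    constructor
    · rintro ⟨⟨hc, hm⟩, hrest⟩
      refine ⟨hc, ?_⟩
      intro q hq
      rcases List.mem_cons.mp hq with rfl | hq'
      · obtain ⟨x, hx, hxe⟩ := List.mem_map.mp hm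
        have hx' : x = s + q.1 := by omega
        rwa [hx'] at hx
      · exact hrest q hq'
    · rintro ⟨hc, hall⟩
      refine ⟨⟨hc, ?_⟩, fun q hq => hall q (List.mem_cons_of_mem _ hq)⟩
      exact List.mem_map.mpr ⟨s + p.1, hall p (List.mem_cons_self ..), by omega⟩

theorem pvMem_enumerate_forall (t : List (List Int)) (s : Int) :
    (∀ p ∈ PySem.List.enumerate t 1, (s + p.1) ∈ p.2) ↔
      (∀ (j : Nat) (h : j < t.length), (s + (j : Int) + 1) ∈ t[j]) := by
  constructor
  · intro hp j hj
    have := hp (1 + (j : Int), t[j]) ((PySem.List.mem_enumerate_iff _ _ _).mpr ⟨j, hj, rfl⟩)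
    simpa [show s + (1 + (j : Int)) = s + (j : Int) + 1 by ring] using this
  · intro hi p hp
    obtain ⟨k, hk, rfl⟩ := (PySem.List.mem_enumerate_iff _ _ _).mp hp
    simpa [show s + ((k : Int)) + 1 = s + (1 + (k : Int)) by ring] using hi k hk

-- ===== VERDICT (by name: the statement is the Claim_ definition above) =====
theorem has_exact_phrase_match_spec : Claim_equal_has_exact_phrase_match := by
  intro wp _ hpre
  unfold Spec_has_exact_phrase_match
  match wp with
  | [] => exact absurd rfl hpre
  | first :: rest =>
    show has_exact_phrase_match (first :: rest) = has_exact_phrase_match_alt (first :: rest)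
    have hA : has_exact_phrase_match (first :: rest) = pvA_outer (first :: rest) first := by
      simp [has_exact_phrase_match, PySem.List.pyGet?, PySem.List.pyIdx?]
    rw [hA]
    unfold has_exact_phrase_match_alt
    simp only []
    set wp := first :: rest with hwp
    have hAiff : pvA_outer wp first = true ↔
        ∃ s ∈ first, ∀ (j : Nat) (h : j < rest.length), (s + (j : Int) + 1) ∈ rest[j] := by
      rw [pvA_outer_iff]
      constructor
      · rintro ⟨s, hs, hinner⟩
        refine ⟨s, hs, ?_⟩
        have heq : pvA_inner wp (PySem.List.pyRange 1 (wp.length : Int) 1) s = pvConsec rest s := by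
          have := pvA_inner_eq_pvConsec wp rest 1 s (by simp [hwp]) (by simp [hwp])
          simpa using this
        rw [heq] at hinner
        exact (pvConsec_iff rest s).mp hinner
      · rintro ⟨s, hs, hall⟩
        refine ⟨s, hs, ?_⟩
        have heq : pvA_inner wp (PySem.List.pyRange 1 (wp.length : Int) 1) s = pvConsec rest s := by
          have := pvA_inner_eq_pvConsec wp rest 1 s (by simp [hwp]) (by simp [hwp])
          simpa using this
        rw [heq]
        exact (pvConsec_iff rest s).mpr hall
    have hBiff :
        (!((PySem.List.enumerate rest 1).foldl
            (fun c p => PySem.Set.inter c (PySem.Set.ofList (p.2.map (fun q => q - p.1))))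
            (PySem.Set.ofList first)).isEmpty) = true ↔
        ∃ s ∈ first, ∀ (j : Nat) (h : j < rest.length), (s + (j : Int) + 1) ∈ rest[j] := by
      rw [Bool.not_eq_eq_eq_not, Bool.not_true, List.isEmpty_eq_false_iff_exists_mem]
      constructor
      · rintro ⟨s, hsmem⟩
        obtain ⟨hc, hall⟩ := (pvB_fold_mem _ _ s).mp hsmem
        exact ⟨s, (PySem.Set.mem_ofList _ _).mp hc, (pvMem_enumerate_forall rest s).mp hall⟩
      · rintro ⟨s, hs, hall⟩
        exact ⟨s, (pvB_fold_mem _ _ s).mpr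
          ⟨(PySem.Set.mem_ofList _ _).mpr hs, (pvMem_enumerate_forall rest s).mpr hall⟩⟩
    rw [Bool.eq_iff_iff, hAiff, hBiff]
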